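-- pv_equiv track=rewrite | github.com/MrBrantCode/unitest_baseline | mut_generate/mist_train_taco/taco_19398/solution.py | count_distinct_echo_substrings
-- ===== SOURCE A (Python) =====
-- from collections import defaultdict, deque
--
-- def count_distinct_echo_substrings(text: str) -> int:
--     if all((x == text[0] for x in text)):
--         return len(text) // 2
--
--     res = set()
--     character_locations = defaultdict(lambda: deque())
--
--     for i, c in enumerate(text):
--         for j in character_locations[c]:
--             if i + (i - j) > len(text):
--                 break
--             if text.startswith(text[i:i + i - j], j):
--                 res.add(text[j:i + i - j])
--         character_locations[c].appendleft(i)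
--
--     return len(res)
-- ===== SOURCE B (Python) =====
-- def count_distinct_echo_substrings(text: str) -> int:
--     # enumerate candidate echoes by half-length L and start p; dedup with a set
--     n = len(text)
--     res = set()
--     for L in range(1, n // 2 + 1):
--         for p in range(0, n - 2 * L + 1):
--             if text[p:p + L] == text[p + L:p + 2 * L]:
--                 res.add(text[p:p + 2 * L])
--     return len(res)
-- ===== Notes on version B (the rewrite author's own statement) =====
-- stated objective: simpler
-- what changed: B replaces A's per-character deque index with early break and its uniform-string fast path by a plain double loop over half-length and start position that slice-compares the two halves and dedups in a set.
import Mathlib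
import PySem

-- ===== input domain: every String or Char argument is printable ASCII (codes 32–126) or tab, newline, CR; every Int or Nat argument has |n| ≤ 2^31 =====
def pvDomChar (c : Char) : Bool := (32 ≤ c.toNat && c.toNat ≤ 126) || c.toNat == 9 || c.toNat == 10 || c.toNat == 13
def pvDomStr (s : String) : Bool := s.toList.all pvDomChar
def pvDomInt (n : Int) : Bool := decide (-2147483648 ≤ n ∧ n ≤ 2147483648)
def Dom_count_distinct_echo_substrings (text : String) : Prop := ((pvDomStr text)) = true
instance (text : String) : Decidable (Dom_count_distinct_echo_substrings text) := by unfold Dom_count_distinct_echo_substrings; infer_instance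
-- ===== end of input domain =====

-- B replaces A's per-character deque index (with early break) and uniform-string fast path
-- by a plain double loop over half-length and start that compares the two halves; same values, simpler code.

-- ===== PORT A =====

-- inner loop 'for j in character_locations[c]: …' with its break; res is the Python set
def pvInnerA (cs : List Char) (i : Int) (js : List Int) (res : PySem.Set (List Char)) :
    PySem.Set (List Char) :=
  match js with
  | [] => res
  | j :: rest =>
    if (PySem.List.len cs) < i + (i - j) then res          -- 'if i + (i - j) > len(text): break'
    else
      -- 'text.startswith(text[i:i+i-j], j)' — j here satisfies 0 ≤ j, where this equals
      -- "text[i:i+i-j] is a prefix of text[j:]"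
      if List.isPrefixOf (PySem.List.slice cs (some i) (some (i + (i - j))))
                         (PySem.List.slice cs (some j) none) then
        pvInnerA cs i rest (PySem.Set.add res (PySem.List.slice cs (some j) (some (i + (i - j)))))
      else
        pvInnerA cs i rest res

def count_distinct_echo_substrings (text : String) : Int :=
  let cs := text.toList
  -- 'all(x == text[0] for x in text)': text[0] is only evaluated when text is nonempty
  if cs.all (fun x => x == cs.headI) then
    PySem.Int.floordiv (PySem.List.len cs) 2
  else
    let st := (PySem.List.enumerate cs).foldl
      (fun (st : PySem.Set (List Char) × PySem.Dict Char (List Int)) ic =>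
        let js := st.2.getD ic.2 []                        -- defaultdict: missing key ↦ empty deque
        (pvInnerA cs ic.1 js st.1, st.2.insert ic.2 (ic.1 :: js)))  -- appendleft(i)
      (PySem.Set.empty, PySem.Dict.empty)
    (st.1.length : Int)

-- ===== PORT B =====

def count_distinct_echo_substrings_alt (text : String) : Int :=
  let cs := text.toList
  let n := PySem.List.len cs
  let res := (PySem.List.pyRange 1 (PySem.Int.floordiv n 2 + 1) 1).foldl
    (fun res L =>
      (PySem.List.pyRange 0 (n - 2 * L + 1) 1).foldl
        (fun res p =>
          if PySem.List.slice cs (some p) (some (p + L)) ==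
             PySem.List.slice cs (some (p + L)) (some (p + 2 * L)) then
            PySem.Set.add res (PySem.List.slice cs (some p) (some (p + 2 * L)))
          else res)
        res)
    PySem.Set.empty
  (res.length : Int)

-- ===== PRECONDITION & SPEC =====
def Spec_count_distinct_echo_substrings (text : String) (out : Int) : Prop := out = count_distinct_echo_substrings_alt text
instance (text : String) (out : Int) : Decidable (Spec_count_distinct_echo_substrings text out) := by unfold Spec_count_distinct_echo_substrings; infer_instance

-- ===== CLAIM (what is proved, stated in full; the proofs are below) =====
def Claim_equal_count_distinct_echo_substrings : Prop := ∀ (text : String), Dom_count_distinct_echo_substrings text → Spec_count_distinct_echo_substrings text (count_distinct_echo_substrings text)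

-- ===== LEMMAS AND PROOFS =====

-- ---- common characterization: the distinct "echo" substrings ----
def echoStr (cs : List Char) (p L : Nat) : List Char := (cs.drop p).take (2*L)

def EchoAt (cs : List Char) (p L : Nat) : Prop := (cs.drop p).take L = (cs.drop (p+L)).take L

def IsEcho (cs : List Char) (v : List Char) : Prop :=
  ∃ p L : Nat, 1 ≤ L ∧ p + 2*L ≤ cs.length ∧ EchoAt cs p L ∧ v = echoStr cs p L

def EchoUpTo (cs : List Char) (k : Nat) (v : List Char) : Prop :=
  ∃ p L : Nat, 1 ≤ L ∧ p + L < k ∧ p + 2*L ≤ cs.length ∧ EchoAt cs p L ∧ v = echoStr cs p L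

lemma echoUpTo_length (cs v) : EchoUpTo cs cs.length v ↔ IsEcho cs v := by
  constructor
  · rintro ⟨p, L, h1, h2, h3, h4, h5⟩; exact ⟨p, L, h1, h3, h4, h5⟩
  · rintro ⟨p, L, h1, h3, h4, h5⟩; exact ⟨p, L, h1, by omega, h3, h4, h5⟩

lemma echoUpTo_zero (cs v) : ¬ EchoUpTo cs 0 v := by
  rintro ⟨p, L, h1, h2, -⟩; omega

lemma echoUpTo_succ (cs k v) :
    EchoUpTo cs (k+1) v ↔ EchoUpTo cs k v ∨
      (∃ p L : Nat, 1 ≤ L ∧ p + L = k ∧ p + 2*L ≤ cs.length ∧ EchoAt cs p L ∧ v = echoStr cs p L) := by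
  constructor
  · rintro ⟨p, L, h1, h2, h3, h4, h5⟩
    rcases (by omega : p + L < k ∨ p + L = k) with h | h
    · exact Or.inl ⟨p, L, h1, h, h3, h4, h5⟩
    · exact Or.inr ⟨p, L, h1, h, h3, h4, h5⟩
  · rintro (⟨p, L, h1, h2, h3, h4, h5⟩ | ⟨p, L, h1, h2, h3, h4, h5⟩)
    · exact ⟨p, L, h1, by omega, h3, h4, h5⟩
    · exact ⟨p, L, h1, by omega, h3, h4, h5⟩

-- ---- generic fold lemmas ----
lemma mem_foldl_of_step {α β : Type} [BEq β] (l : List α) (g : α → PySem.Set β → PySem.Set β)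
    (P : α → β → Prop) (h : ∀ x s v, v ∈ g x s ↔ v ∈ s ∨ P x v) (s : PySem.Set β) (v : β) :
    v ∈ l.foldl (fun s x => g x s) s ↔ v ∈ s ∨ ∃ x ∈ l, P x v := by
  induction l generalizing s with
  | nil => simp
  | cons x t ih =>
    simp only [List.foldl_cons, ih, h, List.mem_cons]
    constructor
    · rintro ((hv | hv) | ⟨y, hy, hP⟩)
      · exact Or.inl hv
      · exact Or.inr ⟨x, Or.inl rfl, hv⟩
      · exact Or.inr ⟨y, Or.inr hy, hP⟩
    · rintro (hv | ⟨y, (rfl | hy), hP⟩)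
      · exact Or.inl (Or.inl hv)
      · exact Or.inl (Or.inr hP)
      · exact Or.inr ⟨y, hy, hP⟩

lemma nodup_foldl_of_step {α β : Type} [BEq β] (l : List α) (g : α → PySem.Set β → PySem.Set β)
    (h : ∀ x s, List.Nodup s → List.Nodup (g x s)) (s : PySem.Set β) (hs : List.Nodup s) :
    List.Nodup (l.foldl (fun s x => g x s) s) := by
  induction l generalizing s with
  | nil => exact hs
  | cons x t ih => exact ih _ (h x s hs)

lemma mem_foldl_addIf {α β : Type} [BEq β] [LawfulBEq β] (l : List α) (p : α → Bool)
    (f : α → β) (s : PySem.Set β) (v : β) :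
    v ∈ l.foldl (fun s x => if p x then PySem.Set.add s (f x) else s) s ↔
      v ∈ s ∨ ∃ x ∈ l, p x = true ∧ v = f x := by
  have := mem_foldl_of_step l (fun x s => if p x then PySem.Set.add s (f x) else s)
    (fun x v => p x = true ∧ v = f x) ?_ s v
  · exact this
  · intro x s v
    by_cases hp : p x = true
    · simp [hp, PySem.Set.mem_add]
    · simp [hp]

lemma nodup_foldl_addIf {α β : Type} [BEq β] [LawfulBEq β] (l : List α) (p : α → Bool)
    (f : α → β) (s : PySem.Set β) (hs : List.Nodup s) :
    List.Nodup (l.foldl (fun s x => if p x then PySem.Set.add s (f x) else s) s) := by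
  refine nodup_foldl_of_step l _ ?_ s hs
  intro x s h
  by_cases hp : p x = true
  · simpa [hp] using PySem.Set.nodup_add s (f x) h
  · simpa [hp] using h

-- ---- B's set ----
def Bfold (cs : List Char) : PySem.Set (List Char) :=
  (PySem.List.pyRange 1 (PySem.Int.floordiv (PySem.List.len cs) 2 + 1) 1).foldl
    (fun res L =>
      (PySem.List.pyRange 0 (PySem.List.len cs - 2 * L + 1) 1).foldl
        (fun res p =>
          if PySem.List.slice cs (some p) (some (p + L)) ==
             PySem.List.slice cs (some (p + L)) (some (p + 2 * L)) then
            PySem.Set.add res (PySem.List.slice cs (some p) (some (p + 2 * L)))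
          else res)
        res)
    PySem.Set.empty

lemma alt_eq_Bfold (text : String) :
    count_distinct_echo_substrings_alt text = ((Bfold text.toList).length : Int) := rfl

lemma nodup_Bfold (cs : List Char) : (Bfold cs).Nodup := by
  refine nodup_foldl_of_step _ _ ?_ _ (by simp [PySem.Set.empty])
  intro L s hs
  exact nodup_foldl_addIf _ _ _ _ hs

lemma slice_natCast_add' (cs : List Char) (p L : Nat) :
    PySem.List.slice cs (some (p : Int)) (some ((p : Int) + (L : Int))) = (cs.drop p).take L :=
  PySem.List.slice_natCast_add cs p L

lemma mem_Bfold (cs : List Char) (v : List Char) : v ∈ Bfold cs ↔ IsEcho cs v := by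
  unfold Bfold
  rw [mem_foldl_of_step _ _
    (fun L v => ∃ p ∈ PySem.List.pyRange 0 (PySem.List.len cs - 2 * L + 1) 1,
      (PySem.List.slice cs (some p) (some (p + L)) ==
        PySem.List.slice cs (some (p + L)) (some (p + 2 * L))) = true ∧
      v = PySem.List.slice cs (some p) (some (p + 2 * L)))
    (fun L s v => mem_foldl_addIf _ _ _ s v)]
  simp only [PySem.Set.empty, List.not_mem_nil, false_or]
  constructor
  · rintro ⟨L, hL, p, hp, heq, rfl⟩
    rw [PySem.List.mem_pyRange_one] at hL hp
    simp only [PySem.List.len_eq] at hL hp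
    lift L to ℕ using (by omega) with Ln
    lift p to ℕ using (by omega) with pn
    have h2 : 2 * Ln ≤ cs.length ∧ 1 ≤ Ln ∧ pn + 2 * Ln ≤ cs.length := by
      refine ⟨?_, by exact_mod_cast hL.1, ?_⟩
      · have := hL.2
        rw [PySem.Int.floordiv_eq_ediv_of_pos (by norm_num)] at this
        omega
      · omega
    refine ⟨pn, Ln, h2.2.1, h2.2.2, ?_, ?_⟩
    · rw [beq_iff_eq] at heq
      have e1 : PySem.List.slice cs (some (pn : Int)) (some ((pn : Int) + (Ln : Int))) = (cs.drop pn).take Ln :=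
        slice_natCast_add' cs pn Ln
      have e2 : PySem.List.slice cs (some ((pn : Int) + (Ln : Int))) (some ((pn : Int) + 2 * (Ln : Int))) = (cs.drop (pn + Ln)).take Ln := by
        have h : ((pn : Int) + (Ln : Int)) = ((pn + Ln : Nat) : Int) := by push_cast; ring
        rw [h]
        have h2 : ((pn : Int) + 2 * (Ln : Int)) = (((pn + Ln : Nat) : Int) + (Ln : Int)) := by push_cast; ring
        rw [h2, slice_natCast_add']
      rw [e1, e2] at heq
      exact heq
    · have h : ((pn : Int) + 2 * (Ln : Int)) = ((pn : Int) + ((2 * Ln : Nat) : Int)) := by push_cast; ring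
      rw [h, slice_natCast_add']
      rfl
  · rintro ⟨p, L, h1, h2, h3, rfl⟩
    refine ⟨(L : Int), ?_, (p : Int), ?_, ?_, ?_⟩
    · rw [PySem.List.mem_pyRange_one]
      simp only [PySem.List.len_eq]
      rw [PySem.Int.floordiv_eq_ediv_of_pos (by norm_num)]
      omega
    · rw [PySem.List.mem_pyRange_one]
      simp only [PySem.List.len_eq]
      omega
    · rw [beq_iff_eq]
      have e1 := slice_natCast_add' cs p L
      have e2 : PySem.List.slice cs (some ((p : Int) + (L : Int))) (some ((p : Int) + 2 * (L : Int))) = (cs.drop (p + L)).take L := by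
        have h : ((p : Int) + (L : Int)) = ((p + L : Nat) : Int) := by push_cast; ring
        rw [h]
        have h2 : ((p : Int) + 2 * (L : Int)) = (((p + L : Nat) : Int) + (L : Int)) := by push_cast; ring
        rw [h2, slice_natCast_add']
      rw [e1, e2]
      exact h3
    · have h : ((p : Int) + 2 * (L : Int)) = ((p : Int) + ((2 * L : Nat) : Int)) := by push_cast; ring
      rw [h, slice_natCast_add']
      rfl

-- ---- A's inner loop and occurrence lists ----
def pvHitA (cs : List Char) (i j : Int) : Prop :=
  i + (i - j) ≤ PySem.List.len cs ∧
  List.isPrefixOf (PySem.List.slice cs (some i) (some (i + (i - j))))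
                  (PySem.List.slice cs (some j) none) = true

def locsAt (cs : List Char) (k : Nat) (c : Char) : List Int :=
  List.map (fun j => Int.ofNat j) (((List.range k).filter (fun j => cs[j]? == some c)).reverse)

lemma mem_locsAt (cs k c x) :
    x ∈ locsAt cs k c ↔ ∃ j : Nat, j < k ∧ cs[j]? = some c ∧ x = (j : Int) := by
  unfold locsAt
  rw [List.mem_map]
  constructor
  · rintro ⟨j, hj, rfl⟩
    rw [List.mem_reverse, List.mem_filter, List.mem_range, beq_iff_eq] at hj
    exact ⟨j, hj.1, hj.2, rfl⟩
  · rintro ⟨j, hj, hc, rfl⟩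
    exact ⟨j, by rw [List.mem_reverse, List.mem_filter, List.mem_range, beq_iff_eq]; exact ⟨hj, hc⟩, rfl⟩

lemma locsAt_pairwise (cs k c) : (locsAt cs k c).Pairwise (· > ·) := by
  unfold locsAt
  refine List.Pairwise.map _ (fun a b (h : a > b) => ?_) ?_
  · exact Int.ofNat_lt.mpr h
  · rw [List.pairwise_reverse]
    exact List.Pairwise.filter _ (List.pairwise_lt_range)

lemma locsAt_zero (cs c) : locsAt cs 0 c = [] := by simp [locsAt]

lemma locsAt_succ (cs k c) :
    locsAt cs (k+1) c = (if cs[k]? == some c then [(k : Int)] else []) ++ locsAt cs k c := by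
  unfold locsAt
  rw [List.range_succ, List.filter_append, List.reverse_append]
  by_cases h : cs[k]? == some c <;> simp [h]

lemma nodup_innerA (cs i js res) (h : List.Nodup res) : List.Nodup (pvInnerA cs i js res) := by
  induction js generalizing res with
  | nil => exact h
  | cons j rest ih =>
    unfold pvInnerA
    split
    · exact h
    · split
      · exact ih _ (PySem.Set.nodup_add _ _ h)
      · exact ih _ h

lemma mem_innerA (cs : List Char) (i : Int) (js : List Int) (res : PySem.Set (List Char))
    (hdec : js.Pairwise (· > ·)) (v : List Char) :
    v ∈ pvInnerA cs i js res ↔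
      v ∈ res ∨ ∃ j ∈ js, pvHitA cs i j ∧ v = PySem.List.slice cs (some j) (some (i + (i - j))) := by
  induction js generalizing res with
  | nil => simp [pvInnerA]
  | cons j rest ih =>
    rw [List.pairwise_cons] at hdec
    unfold pvInnerA
    split
    · rename_i hbrk
      simp only [List.mem_cons]
      constructor
      · exact Or.inl
      · rintro (hv | ⟨j', (rfl | hj'), ⟨hle, _⟩, _⟩)
        · exact hv
        · omega
        · have := hdec.1 j' hj'
          omega
    · rename_i hbrk
      split
      · rename_i hpre
        rw [ih _ hdec.2]
        simp only [PySem.Set.mem_add, List.mem_cons]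
        constructor
        · rintro ((hv | rfl) | ⟨j', hj', hhit, hv⟩)
          · exact Or.inl hv
          · exact Or.inr ⟨j, Or.inl rfl, ⟨by omega, hpre⟩, rfl⟩
          · exact Or.inr ⟨j', Or.inr hj', hhit, hv⟩
        · rintro (hv | ⟨j', (rfl | hj'), hhit, hv⟩)
          · exact Or.inl (Or.inl hv)
          · exact Or.inl (Or.inr hv)
          · exact Or.inr ⟨j', hj', hhit, hv⟩
      · rename_i hpre
        rw [ih _ hdec.2]
        simp only [List.mem_cons]
        constructor
        · rintro (hv | ⟨j', hj', hhit, hv⟩)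
          · exact Or.inl hv
          · exact Or.inr ⟨j', Or.inr hj', hhit, hv⟩
        · rintro (hv | ⟨j', (rfl | hj'), hhit, hv⟩)
          · exact Or.inl hv
          · exact absurd hhit.2 (by simpa using hpre)
          · exact Or.inr ⟨j', hj', hhit, hv⟩

lemma prefix_iff_echoAt (cs : List Char) (p L : Nat) (hn : p + 2*L ≤ cs.length) :
    (List.isPrefixOf ((cs.drop (p+L)).take L) (cs.drop p) = true) ↔ EchoAt cs p L := by
  rw [List.isPrefixOf_iff_prefix, List.prefix_iff_eq_take]
  have hlen : ((cs.drop (p+L)).take L).length = L := by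
    simp [List.length_take, List.length_drop]; omega
  rw [hlen]
  unfold EchoAt
  exact eq_comm

lemma echoAt_head (cs : List Char) (p L : Nat) (hL : 1 ≤ L) (hn : p + 2*L ≤ cs.length)
    (h : EchoAt cs p L) : cs[p]? = some cs[p + L] := by
  have h0 := congrArg (fun l => l[0]?) h
  simp only [List.getElem?_take, List.getElem?_drop] at h0
  simp only [if_pos (by omega : 0 < L)] at h0
  rw [Nat.add_zero, Nat.add_zero] at h0
  rw [h0]
  exact List.getElem?_eq_getElem (by omega)

lemma stepEcho (cs : List Char) (k : Nat) (hk : k < cs.length) (v : List Char) :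
    (∃ j ∈ locsAt cs k cs[k], pvHitA cs (k : Int) j ∧
        v = PySem.List.slice cs (some j) (some ((k : Int) + ((k : Int) - j)))) ↔
    (∃ p L : Nat, 1 ≤ L ∧ p + L = k ∧ p + 2*L ≤ cs.length ∧ EchoAt cs p L ∧ v = echoStr cs p L) := by
  constructor
  · rintro ⟨j, hj, ⟨hle, hpre⟩, rfl⟩
    rw [mem_locsAt] at hj
    obtain ⟨p, hpk, hcp, rfl⟩ := hj
    rw [PySem.List.len_eq] at hle
    refine ⟨p, k - p, by omega, by omega, by omega, ?_, ?_⟩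
    · rw [show ((k : Int) + ((k : Int) - (p : Int))) = ((k : Int) + ((k - p : Nat) : Int)) by omega,
        PySem.List.slice_natCast_add, PySem.List.slice_from_natCast] at hpre
      rw [show k = p + (k - p) by omega] at hpre
      rw [show p + (k - p) - p = k - p by omega] at hpre
      exact (prefix_iff_echoAt cs p (k - p) (by omega)).mp hpre
    · rw [show ((k : Int) + ((k : Int) - (p : Int))) = ((p : Int) + ((2 * (k - p) : Nat) : Int)) by omega,
        PySem.List.slice_natCast_add]
      rfl
  · rintro ⟨p, L, hL, hpL, hn, hEcho, rfl⟩
    subst hpL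
    refine ⟨(p : Int), ?_, ⟨?_, ?_⟩, ?_⟩
    · rw [mem_locsAt]
      exact ⟨p, by omega, echoAt_head cs p L hL hn hEcho, rfl⟩
    · rw [PySem.List.len_eq]; omega
    · rw [show (((p + L : Nat) : Int) + (((p + L : Nat) : Int) - (p : Int))) = (((p + L : Nat) : Int) + (L : Int)) by omega,
        PySem.List.slice_natCast_add, PySem.List.slice_from_natCast]
      exact (prefix_iff_echoAt cs p L (by omega)).mpr hEcho
    · rw [show (((p + L : Nat) : Int) + (((p + L : Nat) : Int) - (p : Int))) = ((p : Int) + ((2 * L : Nat) : Int)) by omega,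
        PySem.List.slice_natCast_add]
      rfl

-- ---- A's main fold invariant ----
lemma foldA (cs : List Char) : ∀ (m k : Nat) (res : PySem.Set (List Char))
    (locs : PySem.Dict Char (List Int)),
    k + m = cs.length → res.Nodup → (∀ v, v ∈ res ↔ EchoUpTo cs k v) →
    (∀ c, locs.getD c [] = locsAt cs k c) →
    (((PySem.List.enumerate (cs.drop k) (k : Int)).foldl
        (fun (st : PySem.Set (List Char) × PySem.Dict Char (List Int)) ic =>
          let js := st.2.getD ic.2 []
          (pvInnerA cs ic.1 js st.1, st.2.insert ic.2 (ic.1 :: js)))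
        (res, locs)).1.Nodup ∧
      ∀ v, v ∈ ((PySem.List.enumerate (cs.drop k) (k : Int)).foldl
        (fun (st : PySem.Set (List Char) × PySem.Dict Char (List Int)) ic =>
          let js := st.2.getD ic.2 []
          (pvInnerA cs ic.1 js st.1, st.2.insert ic.2 (ic.1 :: js)))
        (res, locs)).1 ↔ EchoUpTo cs cs.length v) := by
  intro m
  induction m with
  | zero =>
    intro k res locs hkm hnd hmem hlocs
    have hdrop : cs.drop k = [] := by rw [List.drop_eq_nil_iff]; omega
    rw [hdrop]
    have hk : k = cs.length := by omega
    subst hk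
    exact ⟨hnd, hmem⟩
  | succ m ih =>
    intro k res locs hkm hnd hmem hlocs
    have hk : k < cs.length := by omega
    rw [List.drop_eq_getElem_cons hk, PySem.List.enumerate_cons, List.foldl_cons,
      show ((k : Int) + 1) = ((k + 1 : Nat) : Int) by push_cast; ring]
    have hjs : locs.getD cs[k] [] = locsAt cs k cs[k] := hlocs _
    refine ih (k+1) (pvInnerA cs (k : Int) (locs.getD cs[k] []) res)
      (locs.insert cs[k] ((k : Int) :: locs.getD cs[k] [])) (by omega) ?_ ?_ ?_
    · exact nodup_innerA _ _ _ _ hnd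
    · intro v
      rw [hjs, mem_innerA _ _ _ _ (locsAt_pairwise _ _ _), hmem, echoUpTo_succ,
        ← stepEcho cs k hk v]
    · intro c
      rw [PySem.Dict.getD_insert, locsAt_succ]
      by_cases hc : c = cs[k]
      · subst hc
        rw [if_pos rfl, hjs]
        simp [List.getElem?_eq_getElem hk]
      · rw [if_neg hc, hlocs]
        have : (cs[k]? == some c) = false := by
          simp [List.getElem?_eq_getElem hk]
          exact fun h => hc h.symm
        rw [this]
        simp

-- ---- the uniform-string fast path ----
lemma isEcho_replicate (n : Nat) (c : Char) (v : List Char) :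
    IsEcho (List.replicate n c) v ↔ ∃ L : Nat, 1 ≤ L ∧ 2*L ≤ n ∧ v = List.replicate (2*L) c := by
  constructor
  · rintro ⟨p, L, h1, h2, h3, rfl⟩
    rw [List.length_replicate] at h2
    refine ⟨L, h1, by omega, ?_⟩
    unfold echoStr
    rw [List.drop_replicate, List.take_replicate]
    congr 1
    omega
  · rintro ⟨L, h1, h2, rfl⟩
    refine ⟨0, L, h1, by simpa using h2, ?_, ?_⟩
    · unfold EchoAt
      rw [List.drop_replicate, List.drop_replicate, List.take_replicate, List.take_replicate]
      congr 1
      omega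
    · unfold echoStr
      rw [List.drop_replicate, List.take_replicate]
      congr 1
      omega

lemma length_Bfold_replicate (n : Nat) (c : Char) :
    (Bfold (List.replicate n c)).length = n / 2 := by
  have hperm : (Bfold (List.replicate n c)).Perm
      ((List.range (n/2)).map (fun k => List.replicate (2*(k+1)) c)) := by
    rw [List.perm_ext_iff_of_nodup (nodup_Bfold _) ?_]
    · intro v
      rw [mem_Bfold, isEcho_replicate, List.mem_map]
      constructor
      · rintro ⟨L, h1, h2, rfl⟩
        exact ⟨L - 1, by rw [List.mem_range]; omega, by congr 1; omega⟩
      · rintro ⟨k, hk, rfl⟩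
        rw [List.mem_range] at hk
        exact ⟨k + 1, by omega, by omega, rfl⟩
    · refine List.Pairwise.map _ (fun a b (h : a < b) => ?_) (List.pairwise_lt_range)
      intro hEq
      have := congrArg List.length hEq
      rw [List.length_replicate, List.length_replicate] at this
      omega
  rw [hperm.length_eq, List.length_map, List.length_range]

lemma uniform_replicate (cs : List Char) (hall : cs.all (fun x => x == cs.headI) = true) :
    cs = List.replicate cs.length cs.headI := by
  rw [List.eq_replicate_iff]
  refine ⟨rfl, fun b hb => ?_⟩
  rw [List.all_eq_true] at hall
  exact beq_iff_eq.mp (hall b hb)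




-- ===== VERDICT (by name: the statement is the Claim_ definition above) =====
theorem count_distinct_echo_substrings_spec : Claim_equal_count_distinct_echo_substrings := by
  intro text _
  unfold Spec_count_distinct_echo_substrings
  rw [alt_eq_Bfold]
  simp only [count_distinct_echo_substrings]
  split
  · rename_i hall
    rw [uniform_replicate text.toList hall, length_Bfold_replicate]
    rw [PySem.List.len_eq, PySem.Int.floordiv_eq_ediv_of_pos (by norm_num)]
    rw [List.length_replicate]
    omega
  · have h := foldA text.toList text.toList.length 0 PySem.Set.empty PySem.Dict.empty (by omega)
      (by simp [PySem.Set.empty]) (fun v => by simp [PySem.Set.empty, echoUpTo_zero])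
      (fun c => by rw [PySem.Dict.getD_empty, locsAt_zero])
    have hperm : ((PySem.List.enumerate (text.toList.drop 0) ((0 : Nat) : Int)).foldl
        (fun (st : PySem.Set (List Char) × PySem.Dict Char (List Int)) ic =>
          let js := st.2.getD ic.2 []
          (pvInnerA text.toList ic.1 js st.1, st.2.insert ic.2 (ic.1 :: js)))
        (PySem.Set.empty, PySem.Dict.empty)).1.Perm (Bfold text.toList) := by
      rw [List.perm_ext_iff_of_nodup h.1 (nodup_Bfold text.toList)]
      intro v
      rw [h.2 v, mem_Bfold, echoUpTo_length]
    exact congrArg Int.ofNat hperm.length_eq
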